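-- pv_equiv track=rewrite | github.com/MattDeDuck/AdventofCode2020 | day6/solution_p2.py | get_unique_count
-- ===== SOURCE A (Python) =====
-- def get_unique_count(group):
-- 	char = set()
-- 	for i in group:
-- 		cnt = 0
-- 		for j in i:
-- 			if(sum(j in s for s in group) == len(group)):
-- 				char.add(j)
-- 	return len(char)
-- ===== SOURCE B (Python) =====
-- def get_unique_count(group):
--     if not group:
--         return 0
--     common = set(group[0])
--     for s in group[1:]:
--         common &= set(s)
--     return len(common)
-- ===== Notes on version B (the rewrite author's own statement) =====
-- stated objective: faster
-- what changed: Replaces the per-character scan over all members (membership test against every string for every character) by a single left fold intersecting the members' character sets.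
import Mathlib
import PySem

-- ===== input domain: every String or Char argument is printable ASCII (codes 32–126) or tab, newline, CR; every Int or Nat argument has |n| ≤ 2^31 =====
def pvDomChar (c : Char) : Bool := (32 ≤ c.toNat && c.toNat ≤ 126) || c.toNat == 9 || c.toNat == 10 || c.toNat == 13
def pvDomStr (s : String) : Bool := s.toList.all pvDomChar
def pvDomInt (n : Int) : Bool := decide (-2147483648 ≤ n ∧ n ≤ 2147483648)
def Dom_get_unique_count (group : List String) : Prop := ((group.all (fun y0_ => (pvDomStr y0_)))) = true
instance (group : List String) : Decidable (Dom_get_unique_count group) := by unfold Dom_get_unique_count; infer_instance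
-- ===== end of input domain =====

-- B replaces A's quadratic per-character membership scan by one fold intersecting character sets.

-- ===== PORT A =====
def get_unique_count (group : List String) : Int :=
  let char : PySem.Set Char :=
    group.foldl (fun char i =>
      i.toList.foldl (fun char j =>
        if ((group.map (fun s => if j ∈ s.toList then (1 : Int) else 0)).sum = (group.length : Int))
        then PySem.Set.add char j else char) char) PySem.Set.empty
  (char.length : Int)

-- ===== PORT B =====
def get_unique_count_alt (group : List String) : Int :=
  match group with
  | [] => 0
  | g0 :: rest =>
    let common : PySem.Set Char :=
      rest.foldl (fun acc s => PySem.Set.inter acc (PySem.Set.ofList s.toList))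
        (PySem.Set.ofList g0.toList)
    (common.length : Int)

-- ===== PRECONDITION & SPEC =====
def Spec_get_unique_count (group : List String) (out : Int) : Prop := out = get_unique_count_alt group
instance (group : List String) (out : Int) : Decidable (Spec_get_unique_count group out) := by unfold Spec_get_unique_count; infer_instance

-- ===== CLAIM (what is proved, stated in full; the proofs are below) =====
def Claim_equal_get_unique_count : Prop := ∀ (group : List String), Dom_get_unique_count group → Spec_get_unique_count group (get_unique_count group)

-- ===== LEMMAS AND PROOFS =====

-- A's membership test "sum(j in s for s in group) == len(group)" means j occurs in every member.
theorem pv_sum_le_len (j : Char) (gs : List String) :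
    (gs.map (fun s => if j ∈ s.toList then (1 : Int) else 0)).sum ≤ (gs.length : Int) := by
  induction gs with
  | nil => simp
  | cons g gs ih =>
    simp only [List.map_cons, List.sum_cons, List.length_cons]
    split <;> push_cast <;> omega

theorem pv_sum_eq_len_iff (j : Char) (group : List String) :
    ((group.map (fun s => if j ∈ s.toList then (1 : Int) else 0)).sum = (group.length : Int))
      ↔ ∀ s ∈ group, j ∈ s.toList := by
  induction group with
  | nil => simp
  | cons g gs ih =>
    simp only [List.map_cons, List.sum_cons, List.length_cons, List.mem_cons]
    have hle := pv_sum_le_len j gs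
    constructor
    · intro h
      by_cases hj : j ∈ g.toList
      · simp only [hj, if_pos] at h
        have hgs : (gs.map (fun s => if j ∈ s.toList then (1 : Int) else 0)).sum = (gs.length : Int) := by
          push_cast at h ⊢; omega
        rintro s (rfl | hs)
        · exact hj
        · exact (ih.mp hgs) s hs
      · simp only [hj, if_neg, not_false_iff] at h
        exfalso; push_cast at h; omega
    · intro h
      have hg : j ∈ g.toList := h g (Or.inl rfl)
      have hgs : (gs.map (fun s => if j ∈ s.toList then (1 : Int) else 0)).sum = (gs.length : Int) :=
        ih.mpr (fun s hs => h s (Or.inr hs))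
      simp [hg, hgs]; ring

-- A's accumulated set: nodup is preserved and membership is characterised.
theorem pv_a_inner_nodup (cond : Char → Prop) [DecidablePred cond] (l : List Char) (acc : PySem.Set Char) (h : acc.Nodup) :
    (l.foldl (fun c j => if cond j then PySem.Set.add c j else c) acc).Nodup := by
  induction l generalizing acc with
  | nil => exact h
  | cons x xs ih =>
    simp only [List.foldl_cons]
    apply ih
    split
    · exact PySem.Set.nodup_add _ _ h
    · exact h

theorem pv_a_inner_mem (cond : Char → Prop) [DecidablePred cond] (l : List Char) (acc : PySem.Set Char) (y : Char) :
    y ∈ l.foldl (fun c j => if cond j then PySem.Set.add c j else c) acc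
      ↔ y ∈ acc ∨ (y ∈ l ∧ cond y) := by
  induction l generalizing acc with
  | nil => simp
  | cons x xs ih =>
    simp only [List.foldl_cons, ih, List.mem_cons]
    by_cases hc : cond x
    · simp only [hc, if_pos, PySem.Set.mem_add]
      constructor
      · rintro (⟨h | rfl⟩ | ⟨h1, h2⟩)
        · exact Or.inl h
        · exact Or.inr ⟨Or.inl rfl, hc⟩
        · exact Or.inr ⟨Or.inr h1, h2⟩
      · rintro (h | ⟨rfl | h1, h2⟩)
        · exact Or.inl (Or.inl h)
        · exact Or.inl (Or.inr rfl)
        · exact Or.inr ⟨h1, h2⟩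
    · simp only [hc, if_neg, not_false_iff]
      constructor
      · rintro (h | ⟨h1, h2⟩)
        · exact Or.inl h
        · exact Or.inr ⟨Or.inr h1, h2⟩
      · rintro (h | ⟨rfl | h1, h2⟩)
        · exact Or.inl h
        · exact absurd h2 hc
        · exact Or.inr ⟨h1, h2⟩

theorem pv_a_outer_nodup (cond : Char → Prop) [DecidablePred cond] (group : List String) (acc : PySem.Set Char) (h : acc.Nodup) :
    (group.foldl (fun c i => i.toList.foldl (fun c j => if cond j then PySem.Set.add c j else c) c) acc).Nodup := by
  induction group generalizing acc with
  | nil => exact h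
  | cons g gs ih => exact ih _ (pv_a_inner_nodup cond g.toList acc h)

theorem pv_a_outer_mem (cond : Char → Prop) [DecidablePred cond] (group : List String) (acc : PySem.Set Char) (y : Char) :
    y ∈ group.foldl (fun c i => i.toList.foldl (fun c j => if cond j then PySem.Set.add c j else c) c) acc
      ↔ y ∈ acc ∨ (∃ i ∈ group, y ∈ i.toList) ∧ cond y := by
  induction group generalizing acc with
  | nil => simp
  | cons g gs ih =>
    simp only [List.foldl_cons, ih, pv_a_inner_mem, List.mem_cons]
    constructor
    · rintro ((h | ⟨h1, h2⟩) | ⟨⟨i, hi, hy⟩, hc⟩)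
      · exact Or.inl h
      · exact Or.inr ⟨⟨g, Or.inl rfl, h1⟩, h2⟩
      · exact Or.inr ⟨⟨i, Or.inr hi, hy⟩, hc⟩
    · rintro (h | ⟨⟨i, rfl | hi, hy⟩, hc⟩)
      · exact Or.inl (Or.inl h)
      · exact Or.inl (Or.inr ⟨hy, hc⟩)
      · exact Or.inr ⟨⟨i, hi, hy⟩, hc⟩

-- B's intersection fold: nodup and membership.
theorem pv_b_nodup (rest : List String) (acc : PySem.Set Char) (h : acc.Nodup) :
    (rest.foldl (fun acc s => PySem.Set.inter acc (PySem.Set.ofList s.toList)) acc).Nodup := by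
  induction rest generalizing acc with
  | nil => exact h
  | cons g gs ih => exact ih _ (PySem.Set.nodup_inter _ _ h)

theorem pv_b_mem (rest : List String) (acc : PySem.Set Char) (y : Char) :
    y ∈ rest.foldl (fun acc s => PySem.Set.inter acc (PySem.Set.ofList s.toList)) acc
      ↔ y ∈ acc ∧ ∀ s ∈ rest, y ∈ s.toList := by
  induction rest generalizing acc with
  | nil => simp
  | cons g gs ih =>
    simp only [List.foldl_cons, ih, PySem.Set.mem_inter, PySem.Set.mem_ofList, List.mem_cons]
    constructor
    · rintro ⟨⟨h1, h2⟩, h3⟩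
      exact ⟨h1, fun s hs => hs.elim (fun e => e ▸ h2) (h3 s)⟩
    · rintro ⟨h1, h2⟩
      exact ⟨⟨h1, h2 g (Or.inl rfl)⟩, fun s hs => h2 s (Or.inr hs)⟩

-- ===== VERDICT (by name: the statement is the Claim_ definition above) =====
theorem get_unique_count_spec : Claim_equal_get_unique_count := by
  intro group _
  unfold Spec_get_unique_count
  cases group with
  | nil => rfl
  | cons g0 rest =>
    have hperm :
        ((g0 :: rest).foldl (fun char i => i.toList.foldl (fun char j =>
            if (((g0 :: rest).map (fun s => if j ∈ s.toList then (1 : Int) else 0)).sum = ((g0 :: rest).length : Int))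
            then PySem.Set.add char j else char) char) PySem.Set.empty).Perm
          (rest.foldl (fun acc s => PySem.Set.inter acc (PySem.Set.ofList s.toList)) (PySem.Set.ofList g0.toList)) := by
      apply (List.perm_ext_iff_of_nodup
        (pv_a_outer_nodup _ _ _ List.nodup_nil)
        (pv_b_nodup _ _ (PySem.Set.nodup_ofList _))).mpr
      intro y
      rw [pv_a_outer_mem, pv_b_mem]
      simp only [pv_sum_eq_len_iff, PySem.Set.mem_ofList]
      constructor
      · rintro (h | ⟨_, hall⟩)
        · cases h
        · exact ⟨hall g0 (List.mem_cons_self ..), fun s hs => hall s (List.mem_cons_of_mem _ hs)⟩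
      · rintro ⟨h0, hr⟩
        refine Or.inr ⟨⟨g0, List.mem_cons_self .., h0⟩, ?_⟩
        rintro s hs
        rcases List.mem_cons.mp hs with rfl | hs
        · exact h0
        · exact hr s hs
    show get_unique_count (g0 :: rest) = get_unique_count_alt (g0 :: rest)
    unfold get_unique_count get_unique_count_alt
    exact congrArg (fun n : Nat => (n : Int)) hperm.length_eq
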